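-- pv_equiv track=rewrite | github.com/lzfun/LeetCode | code/59_spiral_matrix_II.py | spiralCoords
-- ===== SOURCE A (Python) =====
-- def spiralCoords(min_i, min_j, max_i, max_j):
--     for j in range(min_j, max_j + 1):
--         yield min_i, j
--     for i in range(min_i + 1, max_i + 1):
--         yield i, max_j
--     if min_i < max_i and min_j < max_j:
--         for j in range(max_j - 1, min_j - 1, -1):
--             yield max_i, j
--         for i in range(max_i - 1, min_i, -1):
--             yield i, min_j
-- ===== SOURCE B (Python) =====
-- def spiralCoords(min_i, min_j, max_i, max_j):
--     h = max_i - min_i + 1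
--     w = max_j - min_j + 1
--     top = max(w, 0)
--     right = max(h - 1, 0)
--     proper = h >= 2 and w >= 2
--     bottom = w - 1 if proper else 0
--     left = h - 2 if proper else 0
--
--     def cell(k):
--         if k < top:
--             return (min_i, min_j + k)
--         if k - top < right:
--             return (min_i + 1 + (k - top), max_j)
--         if k - top - right < bottom:
--             return (max_i, max_j - 1 - (k - top - right))
--         return (max_i - 1 - (k - top - right - bottom), min_j)
--
--     return [cell(k) for k in range(top + right + bottom + left)]
-- ===== Notes on version B (the rewrite author's own statement) =====
-- stated objective: alternative
-- what changed: Replaces A's four sequential edge loops by precomputing the four edge lengths and generating the k-th perimeter coordinate from a single closed-form index-to-coordinate function mapped over one range.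
import Mathlib
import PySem

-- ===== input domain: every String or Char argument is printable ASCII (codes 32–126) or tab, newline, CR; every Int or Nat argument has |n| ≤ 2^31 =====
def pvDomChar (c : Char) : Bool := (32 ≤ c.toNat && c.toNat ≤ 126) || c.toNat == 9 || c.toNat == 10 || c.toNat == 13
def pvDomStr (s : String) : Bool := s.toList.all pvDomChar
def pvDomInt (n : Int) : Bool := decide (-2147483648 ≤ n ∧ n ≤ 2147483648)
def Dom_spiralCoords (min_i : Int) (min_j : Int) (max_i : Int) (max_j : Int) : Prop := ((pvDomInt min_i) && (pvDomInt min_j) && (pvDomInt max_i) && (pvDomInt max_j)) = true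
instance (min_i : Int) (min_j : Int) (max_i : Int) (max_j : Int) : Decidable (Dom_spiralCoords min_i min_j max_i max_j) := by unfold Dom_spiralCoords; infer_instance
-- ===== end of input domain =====

-- B replaces A's four sequential edge loops by one closed-form index→coordinate map over a single
-- range of the precomputed perimeter length (objective: alternative decomposition, same cost).
-- A is a Python generator; both sides here denote the list of yielded coordinates.

-- ===== PORT A =====
-- four loops of A, in order: top row, right column, then (if proper) bottom row and left column, both backwards
def spiralCoords (min_i : Int) (min_j : Int) (max_i : Int) (max_j : Int) : List (Int × Int) :=
  ((PySem.List.pyRange min_j (max_j + 1) 1).map (fun j => (min_i, j)))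
  ++ ((PySem.List.pyRange (min_i + 1) (max_i + 1) 1).map (fun i => (i, max_j)))
  ++ (if min_i < max_i ∧ min_j < max_j then
        ((PySem.List.pyRange (max_j - 1) (min_j - 1) (-1)).map (fun j => (max_i, j)))
        ++ ((PySem.List.pyRange (max_i - 1) min_i (-1)).map (fun i => (i, min_j)))
      else [])

-- ===== PORT B =====
-- Source B's nested 'cell': the k-th perimeter coordinate given the first three edge lengths
def spiralCell (min_i min_j max_i max_j top right bottom : Int) (k : Int) : Int × Int :=
  if k < top then (min_i, min_j + k)
  else if k - top < right then (min_i + 1 + (k - top), max_j)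
  else if k - top - right < bottom then (max_i, max_j - 1 - (k - top - right))
  else (max_i - 1 - (k - top - right - bottom), min_j)

def spiralCoords_alt (min_i : Int) (min_j : Int) (max_i : Int) (max_j : Int) : List (Int × Int) :=
  let h := max_i - min_i + 1
  let w := max_j - min_j + 1
  let top := max w 0
  let right := max (h - 1) 0
  let proper := 2 ≤ h ∧ 2 ≤ w
  let bottom := if proper then w - 1 else 0
  let left := if proper then h - 2 else 0
  (PySem.List.pyRange 0 (top + right + bottom + left) 1).map
    (spiralCell min_i min_j max_i max_j top right bottom)

-- ===== PRECONDITION & SPEC =====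
def Spec_spiralCoords (min_i : Int) (min_j : Int) (max_i : Int) (max_j : Int) (out : List (Int × Int)) : Prop := out = spiralCoords_alt min_i min_j max_i max_j
instance (min_i : Int) (min_j : Int) (max_i : Int) (max_j : Int) (out : List (Int × Int)) : Decidable (Spec_spiralCoords min_i min_j max_i max_j out) := by unfold Spec_spiralCoords; infer_instance

-- ===== CLAIM (what is proved, stated in full; the proofs are below) =====
def Claim_equal_spiralCoords : Prop := ∀ (min_i : Int) (min_j : Int) (max_i : Int) (max_j : Int), Dom_spiralCoords min_i min_j max_i max_j → Spec_spiralCoords min_i min_j max_i max_j (spiralCoords min_i min_j max_i max_j)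

-- ===== LEMMAS AND PROOFS =====

-- two upward ranges, mapped, are equal when lengths match and values match index-wise
theorem map_pyRange_seg {α : Type} (f g : Int → α) (a b c d : Int)
    (hlen : (b - a).toNat = (d - c).toNat)
    (hpt : ∀ k : Nat, k < (b - a).toNat → f (a + k) = g (c + k)) :
    (PySem.List.pyRange a b 1).map f = (PySem.List.pyRange c d 1).map g := by
  rw [PySem.List.pyRange_one, PySem.List.pyRange_one, List.map_map, List.map_map, ← hlen]
  exact List.map_congr_left (fun k hk => hpt k (List.mem_range.mp hk))

-- an upward range vs a downward (step -1) range, mapped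
theorem map_pyRange_seg_rev {α : Type} (f g : Int → α) (a b c d : Int)
    (hlen : (b - a).toNat = (c - d).toNat)
    (hpt : ∀ k : Nat, k < (b - a).toNat → f (a + k) = g (c - k)) :
    (PySem.List.pyRange a b 1).map f = (PySem.List.pyRange c d (-1)).map g := by
  rw [PySem.List.pyRange_one, PySem.List.pyRange_neg_one, List.map_map, List.map_map, ← hlen]
  exact List.map_congr_left (fun k hk => hpt k (List.mem_range.mp hk))

theorem spiralCoords_eq (min_i min_j max_i max_j : Int) :
    spiralCoords min_i min_j max_i max_j = spiralCoords_alt min_i min_j max_i max_j := by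
  unfold spiralCoords spiralCoords_alt
  simp only []
  set h := max_i - min_i + 1 with hh
  set w := max_j - min_j + 1 with hw
  set top := max w 0 with htop
  set right := max (h - 1) 0 with hright
  by_cases hp : min_i < max_i ∧ min_j < max_j
  · have hproper : (2 ≤ h ∧ 2 ≤ w) := by constructor <;> omega
    rw [if_pos hp, if_pos hproper, if_pos hproper]
    have htw : top = w := max_eq_left (by omega)
    have hrh : right = h - 1 := max_eq_left (by omega)
    have e1 : (PySem.List.pyRange min_j (max_j + 1) 1).map (fun j => ((min_i, j) : Int × Int))
        = (PySem.List.pyRange 0 top 1).map (spiralCell min_i min_j max_i max_j top right (w - 1)) :=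
      map_pyRange_seg _ _ min_j (max_j + 1) 0 top (by omega)
        (fun k hk => by
          have hk' : (k : Int) < top - 0 := by omega
          unfold spiralCell
          rw [if_pos (by omega)]
          simp)
    have e2 : (PySem.List.pyRange (min_i + 1) (max_i + 1) 1).map (fun i => ((i, max_j) : Int × Int))
        = (PySem.List.pyRange top (top + right) 1).map (spiralCell min_i min_j max_i max_j top right (w - 1)) :=
      map_pyRange_seg _ _ (min_i + 1) (max_i + 1) top (top + right) (by omega)
        (fun k hk => by
          have hk' : (k : Int) < right := by omega
          unfold spiralCell
          rw [if_neg (by omega), if_pos (by omega)]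
          congr 1; omega)
    have e3 : (PySem.List.pyRange (max_j - 1) (min_j - 1) (-1)).map (fun j => ((max_i, j) : Int × Int))
        = (PySem.List.pyRange (top + right) (top + right + (w - 1)) 1).map (spiralCell min_i min_j max_i max_j top right (w - 1)) :=
      (map_pyRange_seg_rev _ _ (top + right) (top + right + (w - 1)) (max_j - 1) (min_j - 1) (by omega)
        (fun k hk => by
          have hk' : (k : Int) < w - 1 := by omega
          unfold spiralCell
          rw [if_neg (by omega), if_neg (by omega), if_pos (by omega)]
          congr 1; omega)).symm
    have e4 : (PySem.List.pyRange (max_i - 1) min_i (-1)).map (fun i => ((i, min_j) : Int × Int))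
        = (PySem.List.pyRange (top + right + (w - 1)) (top + right + (w - 1) + (h - 2)) 1).map (spiralCell min_i min_j max_i max_j top right (w - 1)) :=
      (map_pyRange_seg_rev _ _ (top + right + (w - 1)) (top + right + (w - 1) + (h - 2)) (max_i - 1) min_i (by omega)
        (fun k hk => by
          have hk' : (k : Int) < h - 2 := by omega
          unfold spiralCell
          rw [if_neg (by omega), if_neg (by omega), if_neg (by omega)]
          congr 1; omega)).symm
    have hsplit1 : PySem.List.pyRange 0 (top + right + (w - 1) + (h - 2)) 1
        = PySem.List.pyRange 0 top 1 ++ PySem.List.pyRange top (top + right + (w - 1) + (h - 2)) 1 :=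
      PySem.List.pyRange_one_append _ _ _ (by omega) (by omega)
    have hsplit2 : PySem.List.pyRange top (top + right + (w - 1) + (h - 2)) 1
        = PySem.List.pyRange top (top + right) 1 ++ PySem.List.pyRange (top + right) (top + right + (w - 1) + (h - 2)) 1 :=
      PySem.List.pyRange_one_append _ _ _ (by omega) (by omega)
    have hsplit3 : PySem.List.pyRange (top + right) (top + right + (w - 1) + (h - 2)) 1
        = PySem.List.pyRange (top + right) (top + right + (w - 1)) 1 ++ PySem.List.pyRange (top + right + (w - 1)) (top + right + (w - 1) + (h - 2)) 1 :=
      PySem.List.pyRange_one_append _ _ _ (by omega) (by omega)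
    rw [e1, e2, e3, e4, hsplit1, hsplit2, hsplit3]
    simp [List.append_assoc]
  · have hproper : ¬ (2 ≤ h ∧ 2 ≤ w) := by
      intro hc; exact hp ⟨by omega, by omega⟩
    rw [if_neg hp, if_neg hproper, if_neg hproper, List.append_nil]
    have e1 : (PySem.List.pyRange min_j (max_j + 1) 1).map (fun j => ((min_i, j) : Int × Int))
        = (PySem.List.pyRange 0 top 1).map (spiralCell min_i min_j max_i max_j top right 0) :=
      map_pyRange_seg _ _ min_j (max_j + 1) 0 top (by omega)
        (fun k hk => by
          have hk' : (k : Int) < top - 0 := by omega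
          unfold spiralCell
          rw [if_pos (by omega)]
          simp)
    have e2 : (PySem.List.pyRange (min_i + 1) (max_i + 1) 1).map (fun i => ((i, max_j) : Int × Int))
        = (PySem.List.pyRange top (top + right + 0 + 0) 1).map (spiralCell min_i min_j max_i max_j top right 0) :=
      map_pyRange_seg _ _ (min_i + 1) (max_i + 1) top (top + right + 0 + 0) (by omega)
        (fun k hk => by
          have hk' : (k : Int) < right := by omega
          unfold spiralCell
          rw [if_neg (by omega), if_pos (by omega)]
          congr 1; omega)
    have hsplit : PySem.List.pyRange 0 (top + right + 0 + 0) 1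
        = PySem.List.pyRange 0 top 1 ++ PySem.List.pyRange top (top + right + 0 + 0) 1 :=
      PySem.List.pyRange_one_append _ _ _ (by omega) (by omega)
    rw [e1, e2, hsplit]
    simp

-- ===== VERDICT (by name: the statement is the Claim_ definition above) =====
theorem spiralCoords_spec : Claim_equal_spiralCoords := by
  intro min_i min_j max_i max_j _
  unfold Spec_spiralCoords
  exact spiralCoords_eq min_i min_j max_i max_j
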